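-- pv_equiv track=rewrite | github.com/phusitsom/01204111-Computer-and-Programming-CPE35 | Ext/CU/Solution/09_Nested/[09_MoreDC_34] 09_NestedList_★★★_Fill_In_Numbers.py | pattern5
-- ===== SOURCE A (Python) =====
-- def pattern5(N):
--     c = 1
--     x = []
--     for i in range(N):
--         y = [0 for i in range(i)]
--         x.append(y)
--     for i in range(N):
--         for j in range(N-i):
--             x[j].append(c)
--             c += 1
--     return x
-- ===== SOURCE B (Python) =====
-- def pattern5(N):
--     starts = []
--     s = 1
--     for d in range(N):
--         starts.append(s)
--         s += N - d
--     return [[0] * r + [starts[d] + r for d in range(N - r)] for r in range(N)]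
-- ===== Notes on version B (the rewrite author's own statement) =====
-- stated objective: simpler
-- what changed: A allocates zero-padded rows and then fills them by iterating over diagonals with a running counter and per-cell row mutation; B precomputes the table of diagonal start numbers once and builds each row directly with a single row-major comprehension (no per-cell indexed mutation).
import Mathlib
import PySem

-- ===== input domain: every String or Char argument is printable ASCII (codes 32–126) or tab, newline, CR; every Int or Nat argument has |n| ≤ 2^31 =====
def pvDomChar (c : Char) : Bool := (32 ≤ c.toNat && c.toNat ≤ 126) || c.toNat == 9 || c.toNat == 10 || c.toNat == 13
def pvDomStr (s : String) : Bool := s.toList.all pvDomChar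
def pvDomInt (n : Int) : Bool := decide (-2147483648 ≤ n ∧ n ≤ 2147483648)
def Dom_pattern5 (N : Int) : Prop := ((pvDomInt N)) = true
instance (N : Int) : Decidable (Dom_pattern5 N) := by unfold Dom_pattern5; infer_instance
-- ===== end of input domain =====

-- B replaces A's zero-rows-then-diagonal-counter fill with a precomputed table of
-- diagonal start numbers and a single row-major comprehension (objective: simpler).

-- ===== PORT A =====
def pattern5 (N : Int) : List (List Int) :=
  -- x = []; for i in range(N): x.append([0 for i in range(i)])
  let x : List (List Int) :=
    (PySem.List.pyRange 0 N 1).foldl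
      (fun x i => x ++ [(PySem.List.pyRange 0 i 1).map (fun _ => (0 : Int))]) []
  -- c = 1; for i in range(N): for j in range(N-i): x[j].append(c); c += 1
  -- x[j].append(c) mutates the j-th row: x[j] = x[j] + [c]; j is always in range here
  let st : Int × List (List Int) :=
    (PySem.List.pyRange 0 N 1).foldl
      (fun (st : Int × List (List Int)) i =>
        (PySem.List.pyRange 0 (N - i) 1).foldl
          (fun (st : Int × List (List Int)) j =>
            (st.1 + 1, PySem.List.pySetD st.2 j (PySem.List.pyGetD st.2 j [] ++ [st.1])))
          st)
      (1, x)
  st.2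

-- ===== PORT B =====
def pattern5_alt (N : Int) : List (List Int) :=
  -- starts = []; s = 1; for d in range(N): starts.append(s); s += N - d
  let p : Int × List Int :=
    (PySem.List.pyRange 0 N 1).foldl
      (fun (p : Int × List Int) d => (p.1 + (N - d), p.2 ++ [p.1])) (1, [])
  let starts : List Int := p.2
  -- [[0]*r + [starts[d] + r for d in range(N - r)] for r in range(N)]
  -- starts[d]: d < N - r ≤ len(starts) always, so pyGetD's default 0 is never used
  (PySem.List.pyRange 0 N 1).map (fun r =>
    PySem.List.pyRepeat [(0 : Int)] r ++
      (PySem.List.pyRange 0 (N - r) 1).map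
        (fun d => PySem.List.pyGetD starts d 0 + r))

-- ===== PRECONDITION & SPEC =====
def Spec_pattern5 (N : Int) (out : List (List Int)) : Prop := out = pattern5_alt N
instance (N : Int) (out : List (List Int)) : Decidable (Spec_pattern5 N out) := by unfold Spec_pattern5; infer_instance

-- ===== CLAIM (what is proved, stated in full; the proofs are below) =====
def Claim_equal_pattern5 : Prop := ∀ (N : Int), Dom_pattern5 N → Spec_pattern5 N (pattern5 N)

-- ===== LEMMAS AND PROOFS =====

/-- Start number of diagonal `d` when the side length is `n`:
`1 + Σ_{k<d} (n - k)` (diagonal `k` carries `n - k` numbers). -/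
def pvS (n d : Nat) : Int := 1 + ((List.range d).map (fun k => (n : Int) - (k : Int))).sum

lemma pvS_succ (n i : Nat) : pvS n (i + 1) = pvS n i + ((n : Int) - (i : Int)) := by
  simp [pvS, List.range_succ]; ring

/-- The common value of both programs at `N = n ≥ 0`, row-major. -/
def pvTgt (n : Nat) : List (List Int) :=
  (List.range n).map (fun r =>
    List.replicate r (0 : Int) ++ (List.range (n - r)).map (fun d => pvS n d + (r : Int)))

-- ---- A side ----

lemma A_inner (n m : Nat) (hm : m ≤ n) (c0 : Int) (g : Nat → List Int) :
    (PySem.List.pyRange 0 (m : Int) 1).foldl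
      (fun (st : Int × List (List Int)) j =>
        (st.1 + 1, PySem.List.pySetD st.2 j (PySem.List.pyGetD st.2 j [] ++ [st.1])))
      (c0, (List.range n).map g)
    = (c0 + m, (List.range n).map (fun r => if r < m then g r ++ [c0 + (r : Int)] else g r)) := by
  induction m with
  | zero => simp
  | succ m ih =>
    have hm' : m < n := hm
    have hcast : ((m + 1 : Nat) : Int) = (m : Int) + 1 := by push_cast; ring
    rw [hcast, PySem.List.pyRange_one_succ_right (by positivity), List.foldl_append,
      ih (Nat.le_of_lt hm')]
    simp only [List.foldl_cons, List.foldl_nil, Prod.mk.injEq]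
    refine ⟨by omega, ?_⟩
    rw [PySem.List.pyGetD_natCast, PySem.List.pySetD_natCast]
    have hget : (List.map (fun r => if r < m then g r ++ [c0 + (r : Int)] else g r)
        (List.range n)).getD m [] = g m := by
      simp [List.getD, hm']
    rw [hget]
    apply List.ext_getElem
    · simp
    · intro k hk1 hk2
      simp only [List.length_set, List.length_map, List.length_range] at hk1
      rw [List.getElem_set]
      simp only [List.getElem_map, List.getElem_range]
      split_ifs with h1 h2 h3 h4 h5 <;> first
        | rfl
        | omega
        | (subst h1; rfl)

lemma A_outer (n i : Nat) (hi : i ≤ n) :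
    (PySem.List.pyRange 0 (i : Int) 1).foldl
      (fun (st : Int × List (List Int)) I =>
        (PySem.List.pyRange 0 ((n : Int) - I) 1).foldl
          (fun (st : Int × List (List Int)) j =>
            (st.1 + 1, PySem.List.pySetD st.2 j (PySem.List.pyGetD st.2 j [] ++ [st.1])))
          st)
      (1, (List.range n).map (fun r => List.replicate r (0 : Int)))
    = (pvS n i, (List.range n).map (fun r =>
        List.replicate r (0 : Int) ++
          (List.range (min i (n - r))).map (fun d => pvS n d + (r : Int)))) := by
  induction i with
  | zero => simp [pvS]
  | succ i ih =>
    have hi' : i < n := hi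
    have hcast : ((i + 1 : Nat) : Int) = (i : Int) + 1 := by push_cast; ring
    rw [hcast, PySem.List.pyRange_one_succ_right (by positivity), List.foldl_append,
      ih (Nat.le_of_lt hi')]
    simp only [List.foldl_cons, List.foldl_nil]
    have hsub : ((n : Int) - (i : Int)) = ((n - i : Nat) : Int) := by
      push_cast [Nat.cast_sub (Nat.le_of_lt hi')]; ring
    rw [hsub, A_inner n (n - i) (Nat.sub_le n i) (pvS n i)]
    simp only [Prod.mk.injEq]
    refine ⟨by rw [pvS_succ, hsub], ?_⟩
    apply List.map_congr_left
    intro r hr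
    have hrn : r < n := List.mem_range.mp hr
    by_cases h : r < n - i
    · have h1 : min i (n - r) = i := by omega
      have h2 : min (i + 1) (n - r) = i + 1 := by omega
      simp [h, h1, h2, List.range_succ, List.append_assoc]
    · have h1 : min i (n - r) = n - r := by omega
      have h2 : min (i + 1) (n - r) = n - r := by omega
      simp [h, h1, h2]

lemma A_eq (n : Nat) : pattern5 (n : Int) = pvTgt n := by
  simp only [pattern5]
  have hx : (PySem.List.pyRange 0 (n : Int) 1).foldl
      (fun x i => x ++ [(PySem.List.pyRange 0 i 1).map (fun _ => (0 : Int))]) []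
      = (List.range n).map (fun r => List.replicate r (0 : Int)) := by
    rw [PySem.List.foldl_append_singleton_eq_map, List.nil_append,
      PySem.List.pyRange_zero_nat, List.map_map]
    apply List.map_congr_left
    intro k _
    simp only [Function.comp_def]
    rw [PySem.List.pyRange_zero_nat, List.map_map]
    simp [Function.comp_def, List.map_const']
  rw [hx, A_outer n n le_rfl]
  unfold pvTgt
  apply List.map_congr_left
  intro r hr
  have : min n (n - r) = n - r := by omega
  rw [this]

-- ---- B side ----

lemma B_starts (n m : Nat) :
    (PySem.List.pyRange 0 (m : Int) 1).foldl
      (fun (p : Int × List Int) d => (p.1 + ((n : Int) - d), p.2 ++ [p.1])) (1, [])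
    = (pvS n m, (List.range m).map (pvS n)) := by
  induction m with
  | zero => simp [pvS]
  | succ m ih =>
    have hcast : ((m + 1 : Nat) : Int) = (m : Int) + 1 := by push_cast; ring
    rw [hcast, PySem.List.pyRange_one_succ_right (by positivity), List.foldl_append, ih]
    simp [pvS_succ, List.range_succ]

lemma B_eq (n : Nat) : pattern5_alt (n : Int) = pvTgt n := by
  simp only [pattern5_alt]
  rw [B_starts n n]
  conv_lhs => rw [PySem.List.pyRange_zero_nat, List.map_map]
  unfold pvTgt
  apply List.map_congr_left
  intro r hr
  have hrn : r < n := List.mem_range.mp hr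
  simp only [Function.comp_def]
  congr 1
  · rw [PySem.List.pyRepeat_singleton]
    simp
  · have hsub : ((n : Int) - (r : Int)) = ((n - r : Nat) : Int) := by
      push_cast [Nat.cast_sub (Nat.le_of_lt hrn)]; ring
    rw [hsub, PySem.List.pyRange_zero_nat, List.map_map]
    apply List.map_congr_left
    intro d hd
    have hdn : d < n := by
      have := List.mem_range.mp hd; omega
    simp only [Function.comp_def]
    rw [PySem.List.pyGetD_natCast]
    congr 1
    simp [List.getD, hdn]

-- ===== VERDICT (by name: the statement is the Claim_ definition above) =====
theorem pattern5_spec : Claim_equal_pattern5 := by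
  intro N _
  unfold Spec_pattern5
  by_cases h : 0 ≤ N
  · lift N to Nat using h
    rw [A_eq, B_eq]
  · have hle : N ≤ 0 := le_of_not_ge h
    simp [pattern5, pattern5_alt, PySem.List.pyRange_one_eq_nil hle]
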